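-- pv_equiv track=rewrite | github.com/Miksa-uam/PROMET_2026 | paper2_dir/scripts/arch/cluster_trajectories.py | get_cluster_colors_extended
-- ===== SOURCE A (Python) =====
-- from typing import Dict, List, Optional, Any, Tuple, Union
--
-- DEFAULT_COLORS = [
--     '#1f77b4',  # Blue
--     '#ff7f0e',  # Orange
--     '#2ca02c',  # Green
--     '#d62728',  # Red
--     '#9467bd',  # Purple
--     '#8c564b',  # Brown
--     '#e377c2',  # Pink
--     '#7f7f7f',  # Gray
--     '#bcbd22',  # Olive
--     '#17becf'   # Cyan
-- ]
--
-- def get_cluster_colors_extended(n_clusters: int, palette: Optional[List[str]] = None,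
--                                cluster_colors: Optional[Dict[str, str]] = None) -> List[str]:
--     """
--     Get consistent colors for clusters with extended palette support.
--
--     Parameters:
--     -----------
--     n_clusters : int
--         Number of clusters needing colors
--     palette : List[str], optional
--         Base color palette to use
--     cluster_colors : Dict[str, str], optional
--         Specific cluster color mappings
--
--     Returns:
--     --------
--     List[str]
--         List of colors for clusters
--     """
--     if palette is None:
--         palette = DEFAULT_COLORS
--
--     # If we have specific cluster colors, use them first
--     if cluster_colors:
--         colors = []
--         for i in range(n_clusters):
--             cluster_key = str(i)
--             if cluster_key in cluster_colors:
--                 colors.append(cluster_colors[cluster_key])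
--             elif i < len(palette):
--                 colors.append(palette[i])
--             else:
--                 # Cycle through palette if needed
--                 colors.append(palette[i % len(palette)])
--         return colors
--
--     # Use standard palette extension
--     if len(palette) >= n_clusters:
--         return palette[:n_clusters]
--     else:
--         # Extend palette by cycling
--         extended_palette = palette.copy()
--         while len(extended_palette) < n_clusters:
--             extended_palette.extend(palette)
--         return extended_palette[:n_clusters]
-- ===== SOURCE B (Python) =====
-- DEFAULT_COLORS = [
--     '#1f77b4', '#ff7f0e', '#2ca02c', '#d62728', '#9467bd',
--     '#8c564b', '#e377c2', '#7f7f7f', '#bcbd22', '#17becf'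
-- ]
--
-- def get_cluster_colors_extended(n_clusters, palette=None, cluster_colors=None):
--     pal = DEFAULT_COLORS if palette is None else palette
--     cc = cluster_colors or {}
--     return [cc[str(i)] if str(i) in cc else pal[i % len(pal)]
--             for i in range(n_clusters)]
-- ===== Notes on version B (the rewrite author's own statement) =====
-- stated objective: simpler
-- what changed: B builds the result in a single list comprehension computing each color as mapping[str(i)] if present else palette[i % len(palette)], eliminating A's append loop with three branches, its len(palette) >= n_clusters case split, and the while-loop that materializes an extended palette before slicing.
-- intended difference: For n_clusters < 0 with a falsy cluster_colors mapping and |n_clusters| < len(palette), A's palette[:n_clusters] slice returns the palette minus its last |n_clusters| entries, while B returns [] — the intended value for a non-positive number of clusters (A's own mapping branch also returns [] there). — e.g. on get_cluster_colors_extended(-1, some ["r", "g"], none): A returns ["r"], B returns []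
import Mathlib
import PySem

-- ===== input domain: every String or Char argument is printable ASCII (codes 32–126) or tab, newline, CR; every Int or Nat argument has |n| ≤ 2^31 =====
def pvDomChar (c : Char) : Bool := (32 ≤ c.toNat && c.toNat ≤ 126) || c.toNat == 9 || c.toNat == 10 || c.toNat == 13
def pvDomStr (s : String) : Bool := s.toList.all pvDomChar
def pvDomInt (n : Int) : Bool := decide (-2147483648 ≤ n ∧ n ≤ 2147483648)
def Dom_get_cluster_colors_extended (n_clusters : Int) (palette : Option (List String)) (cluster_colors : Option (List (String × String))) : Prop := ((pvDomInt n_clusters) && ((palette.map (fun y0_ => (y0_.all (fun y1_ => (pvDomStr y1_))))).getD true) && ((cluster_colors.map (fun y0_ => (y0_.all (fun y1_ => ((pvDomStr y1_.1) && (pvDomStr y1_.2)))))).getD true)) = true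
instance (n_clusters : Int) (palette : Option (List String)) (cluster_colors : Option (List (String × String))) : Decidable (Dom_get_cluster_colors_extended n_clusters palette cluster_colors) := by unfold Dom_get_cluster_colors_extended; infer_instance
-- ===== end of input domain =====

-- B replaces A's three-branch append loop / extend-then-slice machinery by one comprehension
-- keyed on mapping[str(i)] else palette[i % len(palette)]; on n_clusters < 0 with a falsy
-- mapping B returns [] where A returns a negative slice of the palette (see D_ below).

def pvDEFAULT_COLORS : List String :=
  ["#1f77b4", "#ff7f0e", "#2ca02c", "#d62728", "#9467bd",
   "#8c564b", "#e377c2", "#7f7f7f", "#bcbd22", "#17becf"]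

-- ===== PORT A =====
-- the 'while len(extended_palette) < n_clusters: extended_palette.extend(palette)' loop;
-- when palette = [] and the guard holds Python diverges, so the port may return anything there
-- (those inputs are outside Pre_): it returns ext.
def pvExtendLoop (palette : List String) (n : Int) (ext : List String) : List String :=
  if (ext.length : Int) < n then
    if _h : palette.length = 0 then ext
    else pvExtendLoop palette n (ext ++ palette)
  else ext
termination_by (n - ext.length).toNat
decreasing_by simp only [List.length_append]; omega

-- the shared tail of A after the 'if cluster_colors:' block (reached when the dict is falsy)
def pvStdExtend (n_clusters : Int) (palette : List String) : List String :=
  if (palette.length : Int) ≥ n_clusters then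
    PySem.List.slice palette none (some n_clusters)
  else
    PySem.List.slice (pvExtendLoop palette n_clusters palette) none (some n_clusters)

def get_cluster_colors_extended (n_clusters : Int) (palette : Option (List String)) (cluster_colors : Option (List (String × String))) : List String :=
  let pal := palette.getD pvDEFAULT_COLORS
  match cluster_colors with
  | some d =>
    if d = [] then pvStdExtend n_clusters pal
    else
      (PySem.List.pyRange 0 n_clusters 1).foldl (fun colors i =>
        let key := PySem.Int.toStr i
        match (PySem.Dict.mk d).get? key with
        | some v => colors ++ [v]
        | none =>
          if i < (pal.length : Int) then
            colors ++ [(PySem.List.pyGet? pal i).getD ""]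
          else
            colors ++ [(PySem.List.pyGet? pal (PySem.Int.mod i (pal.length : Int))).getD ""]) []
  | none => pvStdExtend n_clusters pal

-- ===== PORT B =====
def get_cluster_colors_extended_alt (n_clusters : Int) (palette : Option (List String)) (cluster_colors : Option (List (String × String))) : List String :=
  let pal := palette.getD pvDEFAULT_COLORS
  let cc := PySem.Dict.mk (cluster_colors.getD [])
  (PySem.List.pyRange 0 n_clusters 1).map (fun i =>
    match cc.get? (PySem.Int.toStr i) with
    | some v => v
    | none => (PySem.List.pyGet? pal (PySem.Int.mod i (pal.length : Int))).getD "")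

-- ===== PRECONDITION & SPEC =====
-- Pre_ excludes only inputs on which Python A never returns: with palette == [] and
-- n_clusters > 0, A either loops forever (falsy mapping) or raises ZeroDivisionError
-- (truthy mapping missing some key str(i)); no input on which A returns is excluded.
def Pre_get_cluster_colors_extended (n_clusters : Int) (palette : Option (List String)) (cluster_colors : Option (List (String × String))) : Prop :=
  palette ≠ some [] ∨ n_clusters ≤ 0 ∨
    (cluster_colors.getD [] ≠ [] ∧
      ∀ i ∈ PySem.List.pyRange 0 n_clusters 1,
        ((PySem.Dict.mk (cluster_colors.getD [])).get? (PySem.Int.toStr i)).isSome = true)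
instance (n_clusters : Int) (palette : Option (List String)) (cluster_colors : Option (List (String × String))) : Decidable (Pre_get_cluster_colors_extended n_clusters palette cluster_colors) := by unfold Pre_get_cluster_colors_extended; infer_instance

def pvWitness_get_cluster_colors_extended : Int × Option (List String) × (Option (List (String × String))) :=
  (3, some ["r", "g"], some [("0", "x")])

-- For n_clusters < 0 with a falsy mapping and |n_clusters| < len(palette), A returns
-- palette[:n_clusters] (the palette minus its last |n_clusters| entries) while B returns [],
-- the intended value for a non-positive cluster count (A's own mapping branch returns [] there).
def D_get_cluster_colors_extended (n_clusters : Int) (palette : Option (List String)) (cluster_colors : Option (List (String × String))) : Prop :=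
  n_clusters < 0 ∧ cluster_colors.getD [] = [] ∧
    0 < ((palette.getD pvDEFAULT_COLORS).length : Int) + n_clusters
instance (n_clusters : Int) (palette : Option (List String)) (cluster_colors : Option (List (String × String))) : Decidable (D_get_cluster_colors_extended n_clusters palette cluster_colors) := by unfold D_get_cluster_colors_extended; infer_instance

def Spec_get_cluster_colors_extended (n_clusters : Int) (palette : Option (List String)) (cluster_colors : Option (List (String × String))) (out : List String) : Prop := ¬ D_get_cluster_colors_extended n_clusters palette cluster_colors → out = get_cluster_colors_extended_alt n_clusters palette cluster_colors
instance (n_clusters : Int) (palette : Option (List String)) (cluster_colors : Option (List (String × String))) (out : List String) : Decidable (Spec_get_cluster_colors_extended n_clusters palette cluster_colors out) := by unfold Spec_get_cluster_colors_extended; infer_instance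

def pvDiffWitness_get_cluster_colors_extended : Int × Option (List String) × (Option (List (String × String))) :=
  (-1, some ["r", "g"], none)
def pvDiffWitnessOut_get_cluster_colors_extended : (List String) × (List String) := (["r"], [])

-- ===== CLAIM (what is proved, stated in full; the proofs are below) =====
def Claim_unchanged_get_cluster_colors_extended : Prop := ∀ (n_clusters : Int) (palette : Option (List String)) (cluster_colors : Option (List (String × String))), Dom_get_cluster_colors_extended n_clusters palette cluster_colors → Pre_get_cluster_colors_extended n_clusters palette cluster_colors → Spec_get_cluster_colors_extended n_clusters palette cluster_colors (get_cluster_colors_extended n_clusters palette cluster_colors)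
def Claim_changed_get_cluster_colors_extended : Prop := Dom_get_cluster_colors_extended (pvDiffWitness_get_cluster_colors_extended.1) (pvDiffWitness_get_cluster_colors_extended.2.1) (pvDiffWitness_get_cluster_colors_extended.2.2) ∧ Pre_get_cluster_colors_extended (pvDiffWitness_get_cluster_colors_extended.1) (pvDiffWitness_get_cluster_colors_extended.2.1) (pvDiffWitness_get_cluster_colors_extended.2.2) ∧ D_get_cluster_colors_extended (pvDiffWitness_get_cluster_colors_extended.1) (pvDiffWitness_get_cluster_colors_extended.2.1) (pvDiffWitness_get_cluster_colors_extended.2.2) ∧ get_cluster_colors_extended (pvDiffWitness_get_cluster_colors_extended.1) (pvDiffWitness_get_cluster_colors_extended.2.1) (pvDiffWitness_get_cluster_colors_extended.2.2) = pvDiffWitnessOut_get_cluster_colors_extended.1 ∧ get_cluster_colors_extended_alt (pvDiffWitness_get_cluster_colors_extended.1) (pvDiffWitness_get_cluster_colors_extended.2.1) (pvDiffWitness_get_cluster_colors_extended.2.2) = pvDiffWitnessOut_get_cluster_colors_extended.2 ∧ pvDiffWitnessOut_get_cluster_colors_extended.1 ≠ pvDiffWitnessOut_get_cluster_colors_ex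tended.2
def Claim_exact_get_cluster_colors_extended : Prop := ∀ (n_clusters : Int) (palette : Option (List String)) (cluster_colors : Option (List (String × String))), Dom_get_cluster_colors_extended n_clusters palette cluster_colors → Pre_get_cluster_colors_extended n_clusters palette cluster_colors → D_get_cluster_colors_extended n_clusters palette cluster_colors → get_cluster_colors_extended n_clusters palette cluster_colors ≠ get_cluster_colors_extended_alt n_clusters palette cluster_colors

-- ===== LEMMAS AND PROOFS =====

theorem pv_flatten_rep_get (pal : List String) (hp : 0 < pal.length) :
    ∀ (k j : Nat), j < k * pal.length →
      ((List.replicate k pal).flatten)[j]? = pal[j % pal.length]? := by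
  intro k
  induction k with
  | zero => intro j hj; omega
  | succ k ih =>
    intro j hj
    rw [List.replicate_succ, List.flatten_cons]
    by_cases h : j < pal.length
    · rw [List.getElem?_append_left h, Nat.mod_eq_of_lt h]
    · push_neg at h
      rw [List.getElem?_append_right h, Nat.mod_eq_sub_mod h]
      have h2 : (k+1)*pal.length = k*pal.length + pal.length := by ring
      exact ih (j - pal.length) (by omega)

theorem pv_take_rep_eq_map (pal : List String) (hp : 0 < pal.length)
    (k m : Nat) (hm : m ≤ k * pal.length) :
    ((List.replicate k pal).flatten).take m =
      (List.range m).map (fun j : Nat =>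
        (PySem.List.pyGet? pal (PySem.Int.mod (j : Int) (pal.length : Int))).getD "") := by
  have hlen : ((List.replicate k pal).flatten).length = k * pal.length := by
    simp [List.length_flatten, Function.comp, mul_comm]
  apply List.ext_getElem
  · simp [hlen, hm]
  · intro j h1 h2
    have hj : j < m := by simpa [hlen] using h2
    have hjk : j < k * pal.length := by omega
    have hget := pv_flatten_rep_get pal hp k j hjk
    have hmod : j % pal.length < pal.length := Nat.mod_lt _ hp
    simp only [List.getElem_take, List.getElem_map, List.getElem_range]
    rw [PySem.Int.mod_natCast, PySem.List.pyGet?_natCast]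
    have : ((List.replicate k pal).flatten)[j] = pal[j % pal.length] := by
      have := hget
      rw [List.getElem?_eq_getElem (by omega), List.getElem?_eq_getElem hmod] at this
      exact Option.some.inj this
    rw [this, List.getElem?_eq_getElem hmod]
    rfl

theorem pv_extendLoop_spec (pal : List String) (hp : 0 < pal.length) (n : Int) :
    ∀ (fuel k : Nat), n ≤ ((k + fuel) * pal.length : Nat) →
      ∃ K : Nat, k ≤ K ∧ n ≤ ((K * pal.length : Nat) : Int) ∧
        pvExtendLoop pal n ((List.replicate k pal).flatten) = (List.replicate K pal).flatten := by
  intro fuel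
  induction fuel with
  | zero =>
    intro k hk
    refine ⟨k, le_refl _, by simpa using hk, ?_⟩
    rw [pvExtendLoop]
    have hlen : (((List.replicate k pal).flatten).length : Int) = ((k * pal.length : Nat) : Int) := by
      simp [List.length_flatten, Function.comp, mul_comm]
    rw [if_neg (by rw [hlen]; simpa using hk)]
  | succ fuel ih =>
    intro k hk
    by_cases hlt : (((List.replicate k pal).flatten).length : Int) < n
    · rw [pvExtendLoop, if_pos hlt, dif_neg (by omega)]
      have hstep : (List.replicate k pal).flatten ++ pal = (List.replicate (k + 1) pal).flatten := by
        rw [List.replicate_succ', List.flatten_append]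
        simp
      rw [hstep]
      obtain ⟨K, hK1, hK2, hK3⟩ := ih (k + 1) (by
        have : (k + 1 + fuel) = (k + (fuel + 1)) := by omega
        rw [this]; exact hk)
      exact ⟨K, by omega, hK2, hK3⟩
    · refine ⟨k, le_refl _, ?_, ?_⟩
      · push_neg at hlt
        calc n ≤ (((List.replicate k pal).flatten).length : Int) := hlt
          _ = ((k * pal.length : Nat) : Int) := by
            simp [List.length_flatten, Function.comp, mul_comm]
      · rw [pvExtendLoop, if_neg hlt]

-- the standard-extension tail of A equals B's modulo comprehension, for 0 ≤ n and pal ≠ []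
theorem pv_std_eq_map (pal : List String) (hp : 0 < pal.length) (n : Int) (hn : 0 ≤ n) :
    pvStdExtend n pal =
      (PySem.List.pyRange 0 n 1).map (fun i =>
        (PySem.List.pyGet? pal (PySem.Int.mod i (pal.length : Int))).getD "") := by
  have hrange : (PySem.List.pyRange 0 n 1).map (fun i =>
      (PySem.List.pyGet? pal (PySem.Int.mod i (pal.length : Int))).getD "") =
      (List.range n.toNat).map (fun j : Nat =>
        (PySem.List.pyGet? pal (PySem.Int.mod (j : Int) (pal.length : Int))).getD "") := by
    rw [PySem.List.pyRange_one, List.map_map]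
    simp
  rw [hrange]
  unfold pvStdExtend
  by_cases hle : (pal.length : Int) ≥ n
  · rw [if_pos hle, PySem.List.slice_to pal hn]
    have := pv_take_rep_eq_map pal hp 1 n.toNat (by simpa using (by omega : n.toNat ≤ pal.length))
    simpa using this
  · rw [if_neg hle]
    obtain ⟨K, _, hK2, hK3⟩ := pv_extendLoop_spec pal hp n n.toNat 1 (by
      push_cast
      nlinarith [Int.toNat_of_nonneg hn, (by omega : (1 : Int) ≤ (pal.length : Int))])
    have hinit : pvExtendLoop pal n pal = (List.replicate K pal).flatten := by
      simpa using hK3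
    rw [hinit, PySem.List.slice_to _ hn]
    exact pv_take_rep_eq_map pal hp K n.toNat (by omega)

-- ===== VERDICT (by name: the statements are the Claim_ definitions above) =====
theorem get_cluster_colors_extended_spec : Claim_unchanged_get_cluster_colors_extended := by
  intro n palette cc _hdom hpre hnd
  unfold Pre_get_cluster_colors_extended at hpre
  unfold D_get_cluster_colors_extended at hnd
  unfold get_cluster_colors_extended get_cluster_colors_extended_alt
  set pal := palette.getD pvDEFAULT_COLORS with hpal
  -- case split on the truthiness of the dict
  rcases hcc : cc with _ | d
  · -- cc = none: falsy → pvStdExtend; B's dict is empty so every lookup misses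
    simp only [Option.getD_none, PySem.Dict.mk]
    have hbody : (PySem.List.pyRange 0 n 1).map (fun i =>
        match (PySem.Dict.mk []).get? (PySem.Int.toStr i) with
        | some v => v
        | none => (PySem.List.pyGet? pal (PySem.Int.mod i (pal.length : Int))).getD "") =
        (PySem.List.pyRange 0 n 1).map (fun i =>
        (PySem.List.pyGet? pal (PySem.Int.mod i (pal.length : Int))).getD "") := by
      apply List.map_congr_left; intro i _
      simp [PySem.Dict.get?]
    rw [hbody]
    clear hbody
    by_cases hn : 0 ≤ n
    · by_cases hpz : 0 < pal.length
      · exact pv_std_eq_map pal hpz n hn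
      · -- pal = []; Pre forces n ≤ 0 so n = 0: both sides are []
        have hpalnil : pal = [] := List.length_eq_zero_iff.mp (by omega)
        have hn0 : n = 0 := by
          rcases hpre with h | h | h
          · exfalso
            cases palette with
            | none =>
              rw [hpal] at hpalnil
              exact absurd hpalnil (by simp [pvDEFAULT_COLORS])
            | some l =>
              rw [hpal] at hpalnil
              simp only [Option.getD_some] at hpalnil
              exact h (by rw [hpalnil])
          · omega
          · rw [hcc] at h; simp at h
        subst hn0
        simp [pvStdExtend, PySem.List.pyRange_zero, PySem.List.slice_to]
    · -- n < 0 with falsy cc: D_ must fail → pal.length + n ≤ 0 → slice and range both empty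
      push_neg at hn
      have hD : ¬ (((pal.length : Int) + n) > 0) := by
        intro hgt; exact hnd ⟨hn, by rw [hcc]; rfl, hgt⟩
      push_neg at hD
      rw [PySem.List.pyRange_one_eq_nil (by omega), List.map_nil]
      unfold pvStdExtend
      rw [if_pos (by omega)]
      have : PySem.List.slice pal none (some n) = [] := by
        apply List.eq_nil_of_length_eq_zero
        rw [← PySem.List.slice_zero_start, PySem.List.length_slice]
        have h0 : PySem.List.clampIdx pal.length 0 = 0 := by
          simp [PySem.List.clampIdx_natCast]
        have hcl : PySem.List.clampIdx pal.length n = 0 := by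
          unfold PySem.List.clampIdx
          split_ifs <;> omega
        omega
      rw [this]
  · -- cc = some d
    dsimp only
    by_cases hd : d = []
    · -- falsy dict: same as the none case
      subst hd
      rw [if_pos rfl]
      simp only [Option.getD_some]
      have hbody : (PySem.List.pyRange 0 n 1).map (fun i =>
          match (PySem.Dict.mk []).get? (PySem.Int.toStr i) with
          | some v => v
          | none => (PySem.List.pyGet? pal (PySem.Int.mod i (pal.length : Int))).getD "") =
          (PySem.List.pyRange 0 n 1).map (fun i =>
          (PySem.List.pyGet? pal (PySem.Int.mod i (pal.length : Int))).getD "") := by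
        apply List.map_congr_left; intro i _
        simp [PySem.Dict.get?]
      rw [hbody]
      clear hbody
      by_cases hn : 0 ≤ n
      · by_cases hpz : 0 < pal.length
        · exact pv_std_eq_map pal hpz n hn
        · have hpalnil : pal = [] := List.length_eq_zero_iff.mp (by omega)
          have hn0 : n = 0 := by
            rcases hpre with h | h | h
            · exfalso
              cases palette with
              | none =>
                rw [hpal] at hpalnil
                exact absurd hpalnil (by simp [pvDEFAULT_COLORS])
              | some l =>
                rw [hpal] at hpalnil
                simp only [Option.getD_some] at hpalnil
                exact h (by rw [hpalnil])
            · omega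
            · rw [hcc] at h; simp at h
          subst hn0
          simp [pvStdExtend, PySem.List.pyRange_zero, PySem.List.slice_to]
      · push_neg at hn
        have hD : ¬ (((pal.length : Int) + n) > 0) := by
          intro hgt; exact hnd ⟨hn, by rw [hcc]; rfl, hgt⟩
        push_neg at hD
        rw [PySem.List.pyRange_one_eq_nil (by omega), List.map_nil]
        unfold pvStdExtend
        rw [if_pos (by omega)]
        have : PySem.List.slice pal none (some n) = [] := by
          apply List.eq_nil_of_length_eq_zero
          rw [← PySem.List.slice_zero_start, PySem.List.length_slice]
          have h0 : PySem.List.clampIdx pal.length 0 = 0 := by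
            simp [PySem.List.clampIdx_natCast]
          have hcl : PySem.List.clampIdx pal.length n = 0 := by
            unfold PySem.List.clampIdx
            split_ifs <;> omega
          omega
        rw [this]
    · -- truthy dict: foldl-with-append vs map, pointwise equal on the range
      rw [if_neg hd]
      simp only [Option.getD_some]
      have hfun : (fun (colors : List String) (i : Int) =>
          match (PySem.Dict.mk d).get? (PySem.Int.toStr i) with
          | some v => colors ++ [v]
          | none =>
            if i < (pal.length : Int) then colors ++ [(PySem.List.pyGet? pal i).getD ""]
            else colors ++ [(PySem.List.pyGet? pal (PySem.Int.mod i (pal.length : Int))).getD ""]) =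
          (fun colors i => colors ++ [(fun i =>
          match (PySem.Dict.mk d).get? (PySem.Int.toStr i) with
          | some v => v
          | none =>
            if i < (pal.length : Int) then (PySem.List.pyGet? pal i).getD ""
            else (PySem.List.pyGet? pal (PySem.Int.mod i (pal.length : Int))).getD "") i]) := by
        funext colors i
        cases h : (PySem.Dict.mk d).get? (PySem.Int.toStr i) with
        | some v => simp [h]
        | none => by_cases hlt : i < (pal.length : Int) <;> simp [h, hlt]
      rw [hfun, PySem.List.foldl_append_singleton_eq_map, List.nil_append]
      apply List.map_congr_left
      intro i hi
      dsimp only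
      have hi0 : 0 ≤ i := (PySem.List.mem_pyRange_one.mp hi).1
      cases hget : (PySem.Dict.mk d).get? (PySem.Int.toStr i) with
      | some v => rfl
      | none =>
        simp only []
        by_cases hlt : i < (pal.length : Int)
        · rw [if_pos hlt]
          have : PySem.Int.mod i (pal.length : Int) = i := by
            rw [PySem.Int.mod_eq_emod_of_pos (by omega)]
            exact Int.emod_eq_of_lt hi0 hlt
          rw [this]
        · rw [if_neg hlt]

theorem get_cluster_colors_extended_changed : Claim_changed_get_cluster_colors_extended := by
  unfold Claim_changed_get_cluster_colors_extended; decide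

theorem get_cluster_colors_extended_tight : Claim_exact_get_cluster_colors_extended := by
  intro n palette cc _hdom _hpre hD heq
  unfold D_get_cluster_colors_extended at hD
  obtain ⟨hn, hcc, hlen⟩ := hD
  set pal := palette.getD pvDEFAULT_COLORS with hpal
  have hB : get_cluster_colors_extended_alt n palette cc = [] := by
    unfold get_cluster_colors_extended_alt
    rw [PySem.List.pyRange_one_eq_nil (by omega), List.map_nil]
  have hA : 0 < (get_cluster_colors_extended n palette cc).length := by
    unfold get_cluster_colors_extended
    have hstd : 0 < (pvStdExtend n pal).length := by
      unfold pvStdExtend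
      rw [if_pos (by omega)]
      rw [← PySem.List.slice_zero_start, PySem.List.length_slice]
      have h0 : PySem.List.clampIdx pal.length 0 = 0 := by
        simp [PySem.List.clampIdx_natCast]
      have hcl : (PySem.List.clampIdx pal.length n : Int) = (pal.length : Int) + n ∨
          PySem.List.clampIdx pal.length n = pal.length := by
        unfold PySem.List.clampIdx
        split_ifs <;> omega
      rcases hcl with h | h <;> omega
    rcases hcce : cc with _ | d
    · simpa using hstd
    · have : d = [] := by rw [hcce] at hcc; simpa using hcc
      subst this
      simpa using hstd
  rw [heq, hB] at hA
  simp at hA
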